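-- pv_equiv track=rewrite | github.com/ahegde3/ResumeAI | app/services/resume_editor.py | unescape_latex_special_chars
-- ===== SOURCE A (Python) =====
-- def unescape_latex_special_chars(text: str) -> str:
--     """
--     Unescape LaTeX special characters back to normal text.
--     """
--     # Dictionary of escaped LaTeX characters and their unescaped versions
--     latex_escaped_chars = {
--         r'\&': '&',
--         r'\%': '%',
--         r'\$': '$',
--         r'\#': '#',
--         r'\^{}': '^',
--         r'\_': '_',
--         r'\{': '{',
--         r'\}': '}',
--     }
--
--     # Replace each escaped character with its unescaped version
--     for escaped, char in latex_escaped_chars.items():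
--         text = text.replace(escaped, char)
--
--     return text
-- ===== SOURCE B (Python) =====
-- def unescape_latex_special_chars(text: str) -> str:
--     """
--     Unescape LaTeX special characters back to normal text (single left-to-right scan).
--     """
--     simple = '&%$#_{}'
--     out = []
--     i, n = 0, len(text)
--     while i < n:
--         ch = text[i]
--         if ch == '\\' and i + 1 < n:
--             nxt = text[i + 1]
--             if nxt == '^' and text[i + 2:i + 4] == '{}':
--                 out.append('^')
--                 i += 4
--                 continue
--             if nxt in simple:
--                 out.append(nxt)
--                 i += 2
--                 continue
--         out.append(ch)
--         i += 1
--     return ''.join(out)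
-- ===== Notes on version B (the rewrite author's own statement) =====
-- stated objective: alternative
-- what changed: A runs 8 sequential str.replace passes, rescanning the whole string once per escape sequence; B unescapes in a single left-to-right scan that at each position tries the 4-char caret escape first and then the 2-char escapes, which yields the same result because no replacement output ever re-creates an escape; being pure-Python it trades A's C-level replace loops for one interpreted pass.
import Mathlib
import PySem

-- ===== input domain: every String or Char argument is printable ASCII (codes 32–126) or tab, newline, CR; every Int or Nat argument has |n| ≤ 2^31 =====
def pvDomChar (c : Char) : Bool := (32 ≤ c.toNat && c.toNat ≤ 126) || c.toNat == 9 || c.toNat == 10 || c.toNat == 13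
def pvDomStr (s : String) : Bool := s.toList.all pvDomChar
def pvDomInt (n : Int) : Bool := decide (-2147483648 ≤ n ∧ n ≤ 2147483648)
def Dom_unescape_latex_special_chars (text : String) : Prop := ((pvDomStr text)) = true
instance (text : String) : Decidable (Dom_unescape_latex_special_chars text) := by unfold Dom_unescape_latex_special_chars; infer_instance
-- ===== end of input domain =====

-- B replaces A's 8 sequential str.replace passes by one left-to-right scan of the string (alternative algorithm, same exact output).

-- ===== PORT A =====
-- the dict literal of A
def latexEscapedChars : PySem.Dict String String :=
  PySem.Dict.ofList
    [("\\&", "&"), ("\\%", "%"), ("\\$", "$"), ("\\#", "#"),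
     ("\\^{}", "^"), ("\\_", "_"), ("\\{", "{"), ("\\}", "}")]

-- `for escaped, char in latex_escaped_chars.items(): text = text.replace(escaped, char)`
def unescape_latex_special_chars (text : String) : String :=
  latexEscapedChars.items.foldl (fun t p => PySem.Str.replace t p.1 p.2) text

-- ===== PORT B =====
-- the while-loop of Source B as structural recursion on the character list: at index i it
-- inspects text[i] (ch), text[i+1] (nxt) and the slice text[i+2:i+4], emits one output
-- character and advances by 4, 2 or 1; `out.append`/`''.join` = building the result list.
def scanAux : List Char → List Char
  | [] => []
  | ch :: rest =>
    if ch = '\\' then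
      match rest with
      | [] => [ch]                                   -- i + 1 < n fails: copy ch
      | nxt :: rest2 =>
        if nxt = '^' ∧ rest2.take 2 = ['{', '}'] then  -- text[i+2:i+4] == '{}'
          '^' :: scanAux (rest2.drop 2)                -- i += 4
        else if nxt ∈ ['&', '%', '$', '#', '_', '{', '}'] then  -- nxt in simple
          nxt :: scanAux rest2                         -- i += 2
        else
          ch :: scanAux (nxt :: rest2)                 -- i += 1
    else ch :: scanAux rest                            -- i += 1
  termination_by l => l.length
  decreasing_by all_goals (simp [List.length_drop] <;> omega)

def unescape_latex_special_chars_alt (text : String) : String :=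
  String.ofList (scanAux text.toList)

-- ===== PRECONDITION & SPEC =====
def Spec_unescape_latex_special_chars (text : String) (out : String) : Prop := out = unescape_latex_special_chars_alt text
instance (text : String) (out : String) : Decidable (Spec_unescape_latex_special_chars text out) := by unfold Spec_unescape_latex_special_chars; infer_instance

-- ===== CLAIM (what is proved, stated in full; the proofs are below) =====
def Claim_equal_unescape_latex_special_chars : Prop := ∀ (text : String), Dom_unescape_latex_special_chars text → Spec_unescape_latex_special_chars text (unescape_latex_special_chars text)

-- ===== LEMMAS AND PROOFS =====

-- ---- generic equations for PySem.Chars.replace (nonempty pattern) ----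

theorem replace_def' (old new l : List Char) (hold : old ≠ []) :
    PySem.Chars.replace l old new = PySem.Chars.replace.go old new l.length l [] := by
  simp [PySem.Chars.replace, List.isEmpty_iff, hold]

theorem replace_go_eq (old new : List Char) (hold : old ≠ []) :
    ∀ (fuel : ℕ) (l acc : List Char), l.length ≤ fuel →
      PySem.Chars.replace.go old new fuel l acc = acc.reverse ++ PySem.Chars.replace l old new := by
  intro fuel
  induction fuel using Nat.strong_induction_on with
  | _ fuel ih =>
  intro l acc h
  match fuel, l with
  | 0, l =>
    have hl : l = [] := List.eq_nil_of_length_eq_zero (Nat.le_zero.mp h)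
    subst hl
    rw [replace_def' old new [] hold]
    rw [PySem.Chars.replace.go.eq_def, PySem.Chars.replace.go.eq_def]
    simp
  | fuel+1, [] =>
    rw [replace_def' old new [] hold]
    rw [PySem.Chars.replace.go.eq_def]
    rw [PySem.Chars.replace.go.eq_def]
    simp
  | fuel+1, c :: t =>
    have h' : t.length + 1 ≤ fuel + 1 := by simpa using h
    rw [replace_def' old new (c::t) hold]
    rw [PySem.Chars.replace.go.eq_def]
    conv_rhs => rw [PySem.Chars.replace.go.eq_def]
    simp only [List.length_cons]
    have hlen : 1 ≤ old.length := by
      cases old with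
      | nil => exact absurd rfl hold
      | cons a b => simp
    by_cases hp : old.isPrefixOf (c :: t) = true
    · simp only [hp, if_pos]
      have hd : (List.drop old.length (c :: t)).length ≤ fuel := by
        simp only [List.length_drop, List.length_cons]; omega
      have hd2 : (List.drop old.length (c :: t)).length ≤ t.length := by
        simp only [List.length_drop, List.length_cons]; omega
      rw [ih fuel (by omega) _ _ hd, ih t.length (by omega) _ _ hd2]
      simp
    · simp only [hp, Bool.false_eq_true, if_false]
      have ht : t.length ≤ fuel := by omega
      rw [ih fuel (by omega) _ _ ht, ih t.length (by omega) _ _ le_rfl]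
      simp

theorem replace_nil (old new : List Char) (hold : old ≠ []) :
    PySem.Chars.replace [] old new = [] := by
  rw [replace_def' old new [] hold, PySem.Chars.replace.go.eq_def]
  simp

theorem replace_pos (old new : List Char) (c : Char) (t : List Char)
    (hold : old ≠ []) (h : old <+: (c :: t)) :
    PySem.Chars.replace (c :: t) old new
      = new ++ PySem.Chars.replace (List.drop old.length (c :: t)) old new := by
  have hlen : 1 ≤ old.length := by
    cases old with
    | nil => exact absurd rfl hold
    | cons a b => simp
  rw [replace_def' old new (c::t) hold, PySem.Chars.replace.go.eq_def]
  simp only [List.length_cons, List.isPrefixOf_iff_prefix.mpr h, if_pos]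
  have hd2 : (List.drop old.length (c :: t)).length ≤ t.length := by
    have := h.length_le
    simp only [List.length_drop, List.length_cons]
    simp only [List.length_cons] at this
    omega
  rw [replace_go_eq old new hold t.length _ _ hd2]
  simp

theorem replace_neg (old new : List Char) (c : Char) (t : List Char)
    (h : ¬ old <+: (c :: t)) :
    PySem.Chars.replace (c :: t) old new = c :: PySem.Chars.replace t old new := by
  have hold : old ≠ [] := by rintro rfl; exact h (List.nil_prefix)
  rw [replace_def' old new (c::t) hold, PySem.Chars.replace.go.eq_def]
  have hp : old.isPrefixOf (c :: t) = false := by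
    by_contra hc
    exact h (List.isPrefixOf_iff_prefix.mp (by simpa using hc))
  simp only [List.length_cons, hp, Bool.false_eq_true, if_false]
  rw [replace_go_eq old new hold t.length t [c] le_rfl]
  simp

theorem prefix_singleton_iff (c : Char) (t : List Char) :
    [c] <+: t ↔ t.head? = some c := by
  cases t with
  | nil => simp
  | cons a u => simp [List.cons_prefix_cons, eq_comm]

-- ---- the eight passes of A, on lists ----

def repc (c : Char) (l : List Char) : List Char := PySem.Chars.replace l ['\\', c] [c]

def rep4 (l : List Char) : List Char := PySem.Chars.replace l ['\\', '^', '{', '}'] ['^']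

def chainAll (l : List Char) : List Char :=
  repc '}' (repc '{' (repc '_' (rep4 (repc '#' (repc '$' (repc '%' (repc '&' l)))))))

theorem repc_nil (c : Char) : repc c [] = [] := replace_nil _ _ (by simp)

theorem rep4_nil : rep4 [] = [] := replace_nil _ _ (by simp)

theorem repc_esc (c : Char) (t : List Char) : repc c ('\\' :: c :: t) = c :: repc c t := by
  unfold repc
  rw [replace_pos _ _ _ _ (by simp) ⟨t, rfl⟩]
  simp

theorem rep4_esc (t : List Char) :
    rep4 ('\\' :: '^' :: '{' :: '}' :: t) = '^' :: rep4 t := by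
  unfold rep4
  rw [replace_pos _ _ _ _ (by simp) ⟨t, rfl⟩]
  simp

theorem repc_cons_nb (c a : Char) (t : List Char) (h : a ≠ '\\') :
    repc c (a :: t) = a :: repc c t := by
  unfold repc
  rw [replace_neg]
  simp only [List.cons_prefix_cons]
  rintro ⟨rfl, -⟩
  exact h rfl

theorem rep4_cons_nb (a : Char) (t : List Char) (h : a ≠ '\\') :
    rep4 (a :: t) = a :: rep4 t := by
  unfold rep4
  rw [replace_neg]
  simp only [List.cons_prefix_cons]
  rintro ⟨rfl, -⟩
  exact h rfl

theorem repc_cons_bs (c : Char) (t : List Char) (h : t.head? ≠ some c) :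
    repc c ('\\' :: t) = '\\' :: repc c t := by
  unfold repc
  rw [replace_neg]
  simp only [List.cons_prefix_cons, prefix_singleton_iff]
  rintro ⟨-, hh⟩
  exact h hh

theorem rep4_cons_bs (t : List Char) (h : ¬ ['^', '{', '}'] <+: t) :
    rep4 ('\\' :: t) = '\\' :: rep4 t := by
  unfold rep4
  rw [replace_neg]
  simp only [List.cons_prefix_cons]
  rintro ⟨-, hh⟩
  exact h hh

-- head of a pass output: the substituted char or the old head
theorem repc_head? (c d : Char) (t : List Char) (h : (repc c t).head? = some d) :
    d = c ∨ t.head? = some d := by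
  cases t with
  | nil => rw [repc_nil] at h; simp at h
  | cons a u =>
    by_cases hp : (['\\', c] : List Char) <+: (a :: u)
    · obtain ⟨ha, hu⟩ := List.cons_prefix_cons.mp hp
      obtain ⟨v, rfl⟩ : ∃ v, u = c :: v := by
        obtain ⟨w, hw⟩ := hu
        exact ⟨w, hw.symm⟩
      subst ha
      rw [repc_esc] at h
      simp at h
      exact Or.inl h.symm
    · unfold repc at h
      rw [replace_neg _ _ _ _ hp] at h
      simp at h
      exact Or.inr (by simp [h])

theorem rep4_head? (d : Char) (t : List Char) (h : (rep4 t).head? = some d) :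
    d = '^' ∨ t.head? = some d := by
  cases t with
  | nil => rw [rep4_nil] at h; simp at h
  | cons a u =>
    by_cases hp : (['\\', '^', '{', '}'] : List Char) <+: (a :: u)
    · obtain ⟨ha, hu⟩ := List.cons_prefix_cons.mp hp
      obtain ⟨v, rfl⟩ : ∃ v, u = '^' :: '{' :: '}' :: v := by
        obtain ⟨w, hw⟩ := hu
        exact ⟨w, hw.symm⟩
      subst ha
      rw [rep4_esc] at h
      simp at h
      exact Or.inl h.symm
    · unfold rep4 at h
      rw [replace_neg _ _ _ _ hp] at h
      simp at h
      exact Or.inr (by simp [h])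

theorem repc_head?_ne (c d : Char) (t : List Char) (h1 : d ≠ c) (h2 : t.head? ≠ some d) :
    (repc c t).head? ≠ some d := fun h =>
  (repc_head? c d t h).elim h1 h2

theorem rep4_head?_ne (d : Char) (t : List Char) (h1 : d ≠ '^') (h2 : t.head? ≠ some d) :
    (rep4 t).head? ≠ some d := fun h =>
  (rep4_head? d t h).elim h1 h2

-- a 2-char pass with c ∉ {'{','}'} cannot create a leading "{}"
theorem repc_no_brace (c : Char) (t : List Char) (hc1 : c ≠ '{') (hc2 : c ≠ '}')
    (h : ¬ ['{', '}'] <+: t) : ¬ ['{', '}'] <+: repc c t := by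
  intro hp
  cases t with
  | nil => rw [repc_nil] at hp; simp at hp
  | cons a u =>
    by_cases hm : (['\\', c] : List Char) <+: (a :: u)
    · obtain ⟨ha, hu⟩ := List.cons_prefix_cons.mp hm
      obtain ⟨v, rfl⟩ : ∃ v, u = c :: v := by
        obtain ⟨w, hw⟩ := hu
        exact ⟨w, hw.symm⟩
      subst ha
      rw [repc_esc] at hp
      obtain ⟨hac, -⟩ := List.cons_prefix_cons.mp hp
      exact hc1 hac.symm
    · unfold repc at hp
      rw [replace_neg _ _ _ _ hm] at hp
      obtain ⟨ha, hrest⟩ := List.cons_prefix_cons.mp hp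
      rw [prefix_singleton_iff] at hrest
      rcases repc_head? c '}' u hrest with he | he
      · exact hc2 he.symm
      · obtain ⟨v, rfl⟩ : ∃ v, u = '}' :: v := by
          cases u with
          | nil => simp at he
          | cons x v => simp at he; exact ⟨v, by simp [he]⟩
        exact h (by subst ha; exact ⟨v, rfl⟩)

-- ---- per-shape behaviour of the full 8-pass chain ----

theorem chain_nil : chainAll [] = [] := by
  simp [chainAll, repc_nil, rep4_nil]

theorem chain_nb (a : Char) (t : List Char) (h : a ≠ '\\') :
    chainAll (a :: t) = a :: chainAll t := by
  unfold chainAll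
  rw [repc_cons_nb _ _ _ h, repc_cons_nb _ _ _ h, repc_cons_nb _ _ _ h,
      repc_cons_nb _ _ _ h, rep4_cons_nb _ _ h, repc_cons_nb _ _ _ h,
      repc_cons_nb _ _ _ h, repc_cons_nb _ _ _ h]

theorem chain_bs_nil : chainAll ['\\'] = ['\\'] := by
  unfold chainAll
  rw [repc_cons_bs _ _ (by simp), repc_nil,
      repc_cons_bs _ _ (by simp), repc_nil,
      repc_cons_bs _ _ (by simp), repc_nil,
      repc_cons_bs _ _ (by simp), repc_nil,
      rep4_cons_bs _ (by simp), rep4_nil,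
      repc_cons_bs _ _ (by simp), repc_nil,
      repc_cons_bs _ _ (by simp), repc_nil,
      repc_cons_bs _ _ (by simp), repc_nil]

theorem chain_amp (u : List Char) : chainAll ('\\' :: '&' :: u) = '&' :: chainAll u := by
  unfold chainAll
  rw [repc_esc '&' (u),
      repc_cons_nb '%' '&' (repc '&' (u)) (by decide),
      repc_cons_nb '$' '&' (repc '%' (repc '&' (u))) (by decide),
      repc_cons_nb '#' '&' (repc '$' (repc '%' (repc '&' (u)))) (by decide),
      rep4_cons_nb '&' (repc '#' (repc '$' (repc '%' (repc '&' (u))))) (by decide),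
      repc_cons_nb '_' '&' (rep4 (repc '#' (repc '$' (repc '%' (repc '&' (u)))))) (by decide),
      repc_cons_nb '{' '&' (repc '_' (rep4 (repc '#' (repc '$' (repc '%' (repc '&' (u))))))) (by decide),
      repc_cons_nb '}' '&' (repc '{' (repc '_' (rep4 (repc '#' (repc '$' (repc '%' (repc '&' (u)))))))) (by decide)]

theorem chain_pct (u : List Char) : chainAll ('\\' :: '%' :: u) = '%' :: chainAll u := by
  unfold chainAll
  rw [repc_cons_bs '&' ('%' :: u) (by simp),
      repc_cons_nb '&' '%' (u) (by decide),
      repc_esc '%' (repc '&' (u)),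
      repc_cons_nb '$' '%' (repc '%' (repc '&' (u))) (by decide),
      repc_cons_nb '#' '%' (repc '$' (repc '%' (repc '&' (u)))) (by decide),
      rep4_cons_nb '%' (repc '#' (repc '$' (repc '%' (repc '&' (u))))) (by decide),
      repc_cons_nb '_' '%' (rep4 (repc '#' (repc '$' (repc '%' (repc '&' (u)))))) (by decide),
      repc_cons_nb '{' '%' (repc '_' (rep4 (repc '#' (repc '$' (repc '%' (repc '&' (u))))))) (by decide),
      repc_cons_nb '}' '%' (repc '{' (repc '_' (rep4 (repc '#' (repc '$' (repc '%' (repc '&' (u)))))))) (by decide)]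

theorem chain_dollar (u : List Char) : chainAll ('\\' :: '$' :: u) = '$' :: chainAll u := by
  unfold chainAll
  rw [repc_cons_bs '&' ('$' :: u) (by simp),
      repc_cons_nb '&' '$' (u) (by decide),
      repc_cons_bs '%' ('$' :: repc '&' (u)) (by simp),
      repc_cons_nb '%' '$' (repc '&' (u)) (by decide),
      repc_esc '$' (repc '%' (repc '&' (u))),
      repc_cons_nb '#' '$' (repc '$' (repc '%' (repc '&' (u)))) (by decide),
      rep4_cons_nb '$' (repc '#' (repc '$' (repc '%' (repc '&' (u))))) (by decide),
      repc_cons_nb '_' '$' (rep4 (repc '#' (repc '$' (repc '%' (repc '&' (u)))))) (by decide),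
      repc_cons_nb '{' '$' (repc '_' (rep4 (repc '#' (repc '$' (repc '%' (repc '&' (u))))))) (by decide),
      repc_cons_nb '}' '$' (repc '{' (repc '_' (rep4 (repc '#' (repc '$' (repc '%' (repc '&' (u)))))))) (by decide)]

theorem chain_hash (u : List Char) : chainAll ('\\' :: '#' :: u) = '#' :: chainAll u := by
  unfold chainAll
  rw [repc_cons_bs '&' ('#' :: u) (by simp),
      repc_cons_nb '&' '#' (u) (by decide),
      repc_cons_bs '%' ('#' :: repc '&' (u)) (by simp),
      repc_cons_nb '%' '#' (repc '&' (u)) (by decide),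
      repc_cons_bs '$' ('#' :: repc '%' (repc '&' (u))) (by simp),
      repc_cons_nb '$' '#' (repc '%' (repc '&' (u))) (by decide),
      repc_esc '#' (repc '$' (repc '%' (repc '&' (u)))),
      rep4_cons_nb '#' (repc '#' (repc '$' (repc '%' (repc '&' (u))))) (by decide),
      repc_cons_nb '_' '#' (rep4 (repc '#' (repc '$' (repc '%' (repc '&' (u)))))) (by decide),
      repc_cons_nb '{' '#' (repc '_' (rep4 (repc '#' (repc '$' (repc '%' (repc '&' (u))))))) (by decide),
      repc_cons_nb '}' '#' (repc '{' (repc '_' (rep4 (repc '#' (repc '$' (repc '%' (repc '&' (u)))))))) (by decide)]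

theorem chain_usc (u : List Char) : chainAll ('\\' :: '_' :: u) = '_' :: chainAll u := by
  unfold chainAll
  rw [repc_cons_bs '&' ('_' :: u) (by simp),
      repc_cons_nb '&' '_' (u) (by decide),
      repc_cons_bs '%' ('_' :: repc '&' (u)) (by simp),
      repc_cons_nb '%' '_' (repc '&' (u)) (by decide),
      repc_cons_bs '$' ('_' :: repc '%' (repc '&' (u))) (by simp),
      repc_cons_nb '$' '_' (repc '%' (repc '&' (u))) (by decide),
      repc_cons_bs '#' ('_' :: repc '$' (repc '%' (repc '&' (u)))) (by simp),
      repc_cons_nb '#' '_' (repc '$' (repc '%' (repc '&' (u)))) (by decide),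
      rep4_cons_bs ('_' :: repc '#' (repc '$' (repc '%' (repc '&' (u))))) (by simp [List.cons_prefix_cons]),
      rep4_cons_nb '_' (repc '#' (repc '$' (repc '%' (repc '&' (u))))) (by decide),
      repc_esc '_' (rep4 (repc '#' (repc '$' (repc '%' (repc '&' (u)))))),
      repc_cons_nb '{' '_' (repc '_' (rep4 (repc '#' (repc '$' (repc '%' (repc '&' (u))))))) (by decide),
      repc_cons_nb '}' '_' (repc '{' (repc '_' (rep4 (repc '#' (repc '$' (repc '%' (repc '&' (u)))))))) (by decide)]

theorem chain_lb (u : List Char) : chainAll ('\\' :: '{' :: u) = '{' :: chainAll u := by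
  unfold chainAll
  rw [repc_cons_bs '&' ('{' :: u) (by simp),
      repc_cons_nb '&' '{' (u) (by decide),
      repc_cons_bs '%' ('{' :: repc '&' (u)) (by simp),
      repc_cons_nb '%' '{' (repc '&' (u)) (by decide),
      repc_cons_bs '$' ('{' :: repc '%' (repc '&' (u))) (by simp),
      repc_cons_nb '$' '{' (repc '%' (repc '&' (u))) (by decide),
      repc_cons_bs '#' ('{' :: repc '$' (repc '%' (repc '&' (u)))) (by simp),
      repc_cons_nb '#' '{' (repc '$' (repc '%' (repc '&' (u)))) (by decide),
      rep4_cons_bs ('{' :: repc '#' (repc '$' (repc '%' (repc '&' (u))))) (by simp [List.cons_prefix_cons]),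
      rep4_cons_nb '{' (repc '#' (repc '$' (repc '%' (repc '&' (u))))) (by decide),
      repc_cons_bs '_' ('{' :: rep4 (repc '#' (repc '$' (repc '%' (repc '&' (u)))))) (by simp),
      repc_cons_nb '_' '{' (rep4 (repc '#' (repc '$' (repc '%' (repc '&' (u)))))) (by decide),
      repc_esc '{' (repc '_' (rep4 (repc '#' (repc '$' (repc '%' (repc '&' (u))))))),
      repc_cons_nb '}' '{' (repc '{' (repc '_' (rep4 (repc '#' (repc '$' (repc '%' (repc '&' (u)))))))) (by decide)]

theorem chain_rb (u : List Char) : chainAll ('\\' :: '}' :: u) = '}' :: chainAll u := by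
  unfold chainAll
  rw [repc_cons_bs '&' ('}' :: u) (by simp),
      repc_cons_nb '&' '}' (u) (by decide),
      repc_cons_bs '%' ('}' :: repc '&' (u)) (by simp),
      repc_cons_nb '%' '}' (repc '&' (u)) (by decide),
      repc_cons_bs '$' ('}' :: repc '%' (repc '&' (u))) (by simp),
      repc_cons_nb '$' '}' (repc '%' (repc '&' (u))) (by decide),
      repc_cons_bs '#' ('}' :: repc '$' (repc '%' (repc '&' (u)))) (by simp),
      repc_cons_nb '#' '}' (repc '$' (repc '%' (repc '&' (u)))) (by decide),
      rep4_cons_bs ('}' :: repc '#' (repc '$' (repc '%' (repc '&' (u))))) (by simp [List.cons_prefix_cons]),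
      rep4_cons_nb '}' (repc '#' (repc '$' (repc '%' (repc '&' (u))))) (by decide),
      repc_cons_bs '_' ('}' :: rep4 (repc '#' (repc '$' (repc '%' (repc '&' (u)))))) (by simp),
      repc_cons_nb '_' '}' (rep4 (repc '#' (repc '$' (repc '%' (repc '&' (u)))))) (by decide),
      repc_cons_bs '{' ('}' :: repc '_' (rep4 (repc '#' (repc '$' (repc '%' (repc '&' (u))))))) (by simp),
      repc_cons_nb '{' '}' (repc '_' (rep4 (repc '#' (repc '$' (repc '%' (repc '&' (u))))))) (by decide),
      repc_esc '}' (repc '{' (repc '_' (rep4 (repc '#' (repc '$' (repc '%' (repc '&' (u))))))))]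

theorem chain_caret_match (u : List Char) : chainAll ('\\' :: '^' :: '{' :: '}' :: u) = '^' :: chainAll u := by
  unfold chainAll
  rw [repc_cons_bs '&' ('^' :: '{' :: '}' :: u) (by simp),
      repc_cons_nb '&' '^' ('{' :: '}' :: u) (by decide),
      repc_cons_nb '&' '{' ('}' :: u) (by decide),
      repc_cons_nb '&' '}' (u) (by decide),
      repc_cons_bs '%' ('^' :: '{' :: '}' :: repc '&' (u)) (by simp),
      repc_cons_nb '%' '^' ('{' :: '}' :: repc '&' (u)) (by decide),
      repc_cons_nb '%' '{' ('}' :: repc '&' (u)) (by decide),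
      repc_cons_nb '%' '}' (repc '&' (u)) (by decide),
      repc_cons_bs '$' ('^' :: '{' :: '}' :: repc '%' (repc '&' (u))) (by simp),
      repc_cons_nb '$' '^' ('{' :: '}' :: repc '%' (repc '&' (u))) (by decide),
      repc_cons_nb '$' '{' ('}' :: repc '%' (repc '&' (u))) (by decide),
      repc_cons_nb '$' '}' (repc '%' (repc '&' (u))) (by decide),
      repc_cons_bs '#' ('^' :: '{' :: '}' :: repc '$' (repc '%' (repc '&' (u)))) (by simp),
      repc_cons_nb '#' '^' ('{' :: '}' :: repc '$' (repc '%' (repc '&' (u)))) (by decide),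
      repc_cons_nb '#' '{' ('}' :: repc '$' (repc '%' (repc '&' (u)))) (by decide),
      repc_cons_nb '#' '}' (repc '$' (repc '%' (repc '&' (u)))) (by decide),
      rep4_esc (repc '#' (repc '$' (repc '%' (repc '&' (u))))),
      repc_cons_nb '_' '^' (rep4 (repc '#' (repc '$' (repc '%' (repc '&' (u)))))) (by decide),
      repc_cons_nb '{' '^' (repc '_' (rep4 (repc '#' (repc '$' (repc '%' (repc '&' (u))))))) (by decide),
      repc_cons_nb '}' '^' (repc '{' (repc '_' (rep4 (repc '#' (repc '$' (repc '%' (repc '&' (u)))))))) (by decide)]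

theorem chain_caret_nomatch (u : List Char) (h : ¬ ['{', '}'] <+: u) :
    chainAll ('\\' :: '^' :: u) = '\\' :: '^' :: chainAll u := by
  have hnb : ¬ ['{', '}'] <+: repc '#' (repc '$' (repc '%' (repc '&' u))) :=
    repc_no_brace _ _ (by decide) (by decide)
      (repc_no_brace _ _ (by decide) (by decide)
        (repc_no_brace _ _ (by decide) (by decide)
          (repc_no_brace _ _ (by decide) (by decide) h)))
  unfold chainAll
  rw [repc_cons_bs '&' ('^' :: u) (by simp),
      repc_cons_nb '&' '^' (u) (by decide),
      repc_cons_bs '%' ('^' :: repc '&' (u)) (by simp),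
      repc_cons_nb '%' '^' (repc '&' (u)) (by decide),
      repc_cons_bs '$' ('^' :: repc '%' (repc '&' (u))) (by simp),
      repc_cons_nb '$' '^' (repc '%' (repc '&' (u))) (by decide),
      repc_cons_bs '#' ('^' :: repc '$' (repc '%' (repc '&' (u)))) (by simp),
      repc_cons_nb '#' '^' (repc '$' (repc '%' (repc '&' (u)))) (by decide),
      rep4_cons_bs ('^' :: repc '#' (repc '$' (repc '%' (repc '&' (u))))) (by simp only [List.cons_prefix_cons]; rintro ⟨-, hh⟩; exact hnb hh),
      rep4_cons_nb '^' (repc '#' (repc '$' (repc '%' (repc '&' (u))))) (by decide),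
      repc_cons_bs '_' ('^' :: rep4 (repc '#' (repc '$' (repc '%' (repc '&' (u)))))) (by simp),
      repc_cons_nb '_' '^' (rep4 (repc '#' (repc '$' (repc '%' (repc '&' (u)))))) (by decide),
      repc_cons_bs '{' ('^' :: repc '_' (rep4 (repc '#' (repc '$' (repc '%' (repc '&' (u))))))) (by simp),
      repc_cons_nb '{' '^' (repc '_' (rep4 (repc '#' (repc '$' (repc '%' (repc '&' (u))))))) (by decide),
      repc_cons_bs '}' ('^' :: repc '{' (repc '_' (rep4 (repc '#' (repc '$' (repc '%' (repc '&' (u)))))))) (by simp),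
      repc_cons_nb '}' '^' (repc '{' (repc '_' (rep4 (repc '#' (repc '$' (repc '%' (repc '&' (u)))))))) (by decide)]

theorem chain_bs_other (b : Char) (u : List Char)
    (hb : b ∉ (['&', '%', '$', '#', '_', '{', '}'] : List Char))
    (hc : b ≠ '^') (hbs : b ≠ '\\') :
    chainAll ('\\' :: b :: u) = '\\' :: b :: chainAll u := by
  have hx0 : b ≠ '&' := by intro e; subst e; simp at hb
  have hx1 : b ≠ '%' := by intro e; subst e; simp at hb
  have hx2 : b ≠ '$' := by intro e; subst e; simp at hb
  have hx3 : b ≠ '#' := by intro e; subst e; simp at hb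
  have hx4 : b ≠ '_' := by intro e; subst e; simp at hb
  have hx5 : b ≠ '{' := by intro e; subst e; simp at hb
  have hx6 : b ≠ '}' := by intro e; subst e; simp at hb
  unfold chainAll
  rw [repc_cons_bs '&' (b :: u) (by simp [hx0]),
      repc_cons_nb '&' b (u) hbs,
      repc_cons_bs '%' (b :: repc '&' (u)) (by simp [hx1]),
      repc_cons_nb '%' b (repc '&' (u)) hbs,
      repc_cons_bs '$' (b :: repc '%' (repc '&' (u))) (by simp [hx2]),
      repc_cons_nb '$' b (repc '%' (repc '&' (u))) hbs,
      repc_cons_bs '#' (b :: repc '$' (repc '%' (repc '&' (u)))) (by simp [hx3]),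
      repc_cons_nb '#' b (repc '$' (repc '%' (repc '&' (u)))) hbs,
      rep4_cons_bs (b :: repc '#' (repc '$' (repc '%' (repc '&' (u))))) (by simp only [List.cons_prefix_cons]; rintro ⟨e, -⟩; exact hc e.symm),
      rep4_cons_nb b (repc '#' (repc '$' (repc '%' (repc '&' (u))))) hbs,
      repc_cons_bs '_' (b :: rep4 (repc '#' (repc '$' (repc '%' (repc '&' (u)))))) (by simp [hx4]),
      repc_cons_nb '_' b (rep4 (repc '#' (repc '$' (repc '%' (repc '&' (u)))))) hbs,
      repc_cons_bs '{' (b :: repc '_' (rep4 (repc '#' (repc '$' (repc '%' (repc '&' (u))))))) (by simp [hx5]),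
      repc_cons_nb '{' b (repc '_' (rep4 (repc '#' (repc '$' (repc '%' (repc '&' (u))))))) hbs,
      repc_cons_bs '}' (b :: repc '{' (repc '_' (rep4 (repc '#' (repc '$' (repc '%' (repc '&' (u)))))))) (by simp [hx6]),
      repc_cons_nb '}' b (repc '{' (repc '_' (rep4 (repc '#' (repc '$' (repc '%' (repc '&' (u)))))))) hbs]


theorem chain_bs_bs (u : List Char) :
    chainAll ('\\' :: '\\' :: u) = '\\' :: chainAll ('\\' :: u) := by
  have hd0 : ∀ d, d ≠ '&' → d ≠ '\\' →
      (repc '&' ('\\' :: u)).head? ≠ some d := by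
    intro d h0 h1
    exact repc_head?_ne _ _ _ h0 (by simp only [List.head?_cons, ne_eq, Option.some.injEq]; exact fun e => h1 e.symm)
  have hd1 : ∀ d, d ≠ '%' → d ≠ '&' → d ≠ '\\' →
      (repc '%' (repc '&' ('\\' :: u))).head? ≠ some d := by
    intro d h0 h1 h2
    exact repc_head?_ne _ _ _ h0 (hd0 d h1 h2)
  have hd2 : ∀ d, d ≠ '$' → d ≠ '%' → d ≠ '&' → d ≠ '\\' →
      (repc '$' (repc '%' (repc '&' ('\\' :: u)))).head? ≠ some d := by
    intro d h0 h1 h2 h3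
    exact repc_head?_ne _ _ _ h0 (hd1 d h1 h2 h3)
  have hd3 : ∀ d, d ≠ '#' → d ≠ '$' → d ≠ '%' → d ≠ '&' → d ≠ '\\' →
      (repc '#' (repc '$' (repc '%' (repc '&' ('\\' :: u))))).head? ≠ some d := by
    intro d h0 h1 h2 h3 h4
    exact repc_head?_ne _ _ _ h0 (hd2 d h1 h2 h3 h4)
  have hd4 : ∀ d, d ≠ '^' → d ≠ '#' → d ≠ '$' → d ≠ '%' → d ≠ '&' → d ≠ '\\' →
      (rep4 (repc '#' (repc '$' (repc '%' (repc '&' ('\\' :: u)))))).head? ≠ some d := by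
    intro d h0 h1 h2 h3 h4 h5
    exact rep4_head?_ne _ _ h0 (hd3 d h1 h2 h3 h4 h5)
  have hd5 : ∀ d, d ≠ '_' → d ≠ '^' → d ≠ '#' → d ≠ '$' → d ≠ '%' → d ≠ '&' → d ≠ '\\' →
      (repc '_' (rep4 (repc '#' (repc '$' (repc '%' (repc '&' ('\\' :: u))))))).head? ≠ some d := by
    intro d h0 h1 h2 h3 h4 h5 h6
    exact repc_head?_ne _ _ _ h0 (hd4 d h1 h2 h3 h4 h5 h6)
  have hd6 : ∀ d, d ≠ '{' → d ≠ '_' → d ≠ '^' → d ≠ '#' → d ≠ '$' → d ≠ '%' → d ≠ '&' → d ≠ '\\' →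
      (repc '{' (repc '_' (rep4 (repc '#' (repc '$' (repc '%' (repc '&' ('\\' :: u)))))))).head? ≠ some d := by
    intro d h0 h1 h2 h3 h4 h5 h6 h7
    exact repc_head?_ne _ _ _ h0 (hd5 d h1 h2 h3 h4 h5 h6 h7)
  unfold chainAll
  rw [repc_cons_bs '&' ('\\' :: u) (by simp),
      repc_cons_bs '%' (repc '&' ('\\' :: u)) (hd0 '%' (by decide) (by decide)),
      repc_cons_bs '$' (repc '%' (repc '&' ('\\' :: u))) (hd1 '$' (by decide) (by decide) (by decide)),
      repc_cons_bs '#' (repc '$' (repc '%' (repc '&' ('\\' :: u)))) (hd2 '#' (by decide) (by decide) (by decide) (by decide)),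
      rep4_cons_bs (repc '#' (repc '$' (repc '%' (repc '&' ('\\' :: u))))) (by intro hp; exact hd3 '^' (by decide) (by decide) (by decide) (by decide) (by decide) ((prefix_singleton_iff _ _).mp (List.IsPrefix.trans ⟨['{', '}'], rfl⟩ hp))),
      repc_cons_bs '_' (rep4 (repc '#' (repc '$' (repc '%' (repc '&' ('\\' :: u)))))) (hd4 '_' (by decide) (by decide) (by decide) (by decide) (by decide) (by decide)),
      repc_cons_bs '{' (repc '_' (rep4 (repc '#' (repc '$' (repc '%' (repc '&' ('\\' :: u))))))) (hd5 '{' (by decide) (by decide) (by decide) (by decide) (by decide) (by decide) (by decide)),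
      repc_cons_bs '}' (repc '{' (repc '_' (rep4 (repc '#' (repc '$' (repc '%' (repc '&' ('\\' :: u)))))))) (hd6 '}' (by decide) (by decide) (by decide) (by decide) (by decide) (by decide) (by decide) (by decide))]


-- ---- equations for the scanner ----

theorem scan_nil : scanAux [] = [] := by simp [scanAux]

theorem scan_bs_nil : scanAux ['\\'] = ['\\'] := by simp [scanAux]

theorem scan_esc4 (t : List Char) :
    scanAux ('\\' :: '^' :: '{' :: '}' :: t) = '^' :: scanAux t := by
  rw [scanAux.eq_def]
  simp

theorem scan_esc2 (b : Char) (t : List Char)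
    (hb : b ∈ (['&', '%', '$', '#', '_', '{', '}'] : List Char)) :
    scanAux ('\\' :: b :: t) = b :: scanAux t := by
  have hbne : ¬ (b = '^' ∧ t.take 2 = ['{', '}']) := by
    rintro ⟨rfl, -⟩; simp at hb
  rw [scanAux.eq_def]
  simp [hbne, hb]

theorem scan_skip (b : Char) (t : List Char)
    (h1 : ¬ (b = '^' ∧ t.take 2 = ['{', '}']))
    (h2 : b ∉ (['&', '%', '$', '#', '_', '{', '}'] : List Char)) :
    scanAux ('\\' :: b :: t) = '\\' :: scanAux (b :: t) := by
  rw [scanAux.eq_def]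
  simp [h1, h2]

theorem scan_nb (a : Char) (t : List Char) (h : a ≠ '\\') :
    scanAux (a :: t) = a :: scanAux t := by
  rw [scanAux.eq_def]
  simp [h]

-- ---- the chain IS the scanner ----

theorem chain_eq_scan : ∀ (n : ℕ) (l : List Char), l.length ≤ n → chainAll l = scanAux l := by
  intro n
  induction n using Nat.strong_induction_on with
  | _ n ih =>
  intro l hl
  cases l with
  | nil => rw [chain_nil, scan_nil]
  | cons a t =>
    by_cases ha : a = '\\'
    · subst ha
      cases t with
      | nil => rw [chain_bs_nil, scan_bs_nil]
      | cons b u =>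
        have hlen : u.length + 2 ≤ n := by simpa using hl
        have ihu : chainAll u = scanAux u :=
          ih (u.length) (by omega) u le_rfl
        by_cases hb1 : b = '&'
        · subst hb1; rw [chain_amp, scan_esc2 _ _ (by decide), ihu]
        · by_cases hb2 : b = '%'
          · subst hb2; rw [chain_pct, scan_esc2 _ _ (by decide), ihu]
          · by_cases hb3 : b = '$'
            · subst hb3; rw [chain_dollar, scan_esc2 _ _ (by decide), ihu]
            · by_cases hb4 : b = '#'
              · subst hb4; rw [chain_hash, scan_esc2 _ _ (by decide), ihu]
              · by_cases hb5 : b = '_'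
                · subst hb5; rw [chain_usc, scan_esc2 _ _ (by decide), ihu]
                · by_cases hb6 : b = '{'
                  · subst hb6; rw [chain_lb, scan_esc2 _ _ (by decide), ihu]
                  · by_cases hb7 : b = '}'
                    · subst hb7; rw [chain_rb, scan_esc2 _ _ (by decide), ihu]
                    · have hbmem : b ∉ (['&', '%', '$', '#', '_', '{', '}'] : List Char) := by
                        simp [hb1, hb2, hb3, hb4, hb5, hb6, hb7]
                      by_cases hb8 : b = '^'
                      · subst hb8
                        by_cases hpre : (['{', '}'] : List Char) <+: u
                        · obtain ⟨v, rfl⟩ : ∃ v, u = '{' :: '}' :: v := by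
                            obtain ⟨w, hw⟩ := hpre
                            exact ⟨w, hw.symm⟩
                          have ihv : chainAll v = scanAux v :=
                            ih v.length (by simp at hlen; omega) v le_rfl
                          rw [chain_caret_match, scan_esc4, ihv]
                        · have htake : ¬ ('^' = '^' ∧ u.take 2 = ['{', '}']) := by
                            rintro ⟨-, htk⟩
                            exact hpre (List.prefix_iff_eq_take.mpr (by simp [htk]))
                          rw [chain_caret_nomatch u hpre,
                              scan_skip _ _ htake hbmem,
                              scan_nb _ _ (by decide), ihu]
                      · by_cases hb9 : b = '\\'
                        · subst hb9
                          have ihbu : chainAll ('\\' :: u) = scanAux ('\\' :: u) :=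
                            ih (u.length + 1) (by omega) _ (by simp)
                          rw [chain_bs_bs, scan_skip _ _ (by rintro ⟨e, -⟩; exact hb8 e) hbmem, ihbu]
                        · rw [chain_bs_other b u hbmem hb8 hb9,
                              scan_skip _ _ (by rintro ⟨e, -⟩; exact hb8 e) hbmem,
                              scan_nb _ _ hb9, ihu]
    · have hlen : t.length + 1 ≤ n := by simpa using hl
      rw [chain_nb _ _ ha, scan_nb _ _ ha, ih t.length (by omega) t le_rfl]

-- A's fold of the dict items is the 8-pass chain on the character list
theorem A_toList (text : String) :
    (unescape_latex_special_chars text).toList = chainAll text.toList := by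
  have hitems : latexEscapedChars.items =
      [("\\&", "&"), ("\\%", "%"), ("\\$", "$"), ("\\#", "#"),
       ("\\^{}", "^"), ("\\_", "_"), ("\\{", "{"), ("\\}", "}")] := rfl
  simp only [unescape_latex_special_chars, hitems, List.foldl]
  simp only [PySem.Str.toList_replace]
  rfl

-- ===== VERDICT (by name: the statement is the Claim_ definition above) =====
theorem unescape_latex_special_chars_spec : Claim_equal_unescape_latex_special_chars := by
  intro text _
  unfold Spec_unescape_latex_special_chars unescape_latex_special_chars_alt
  apply String.toList_inj.mp
  rw [String.toList_ofList, A_toList, chain_eq_scan text.toList.length _ le_rfl]
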